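-- pv_equiv track=rewrite | github.com/phoeniex/Papyrus | platform_extractor.py | replace_format_string
-- ===== SOURCE A (Python) =====
-- def replace_format_string(format, string):
--     if string.find(format) != -1:
--         splited_strings = string.split(format)
--         replaced_string = ''
--         for index, value in enumerate(splited_strings):
--             if index == 0:
--                 replaced_string += splited_strings[index]
--             elif index > 0:
--                 replaced_string += '%{}${}{}'.format(index, format[-1], splited_strings[index])
--
--         return replaced_string
--     else:
--         return string
-- ===== SOURCE B (Python) =====
-- def replace_format_string(format, string):
--     # One forward scan with find() instead of split+enumerate; same output.
--     if format not in string: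
--         return string
--     last = format[-1]
--     out = []
--     rest = string
--     n = 0
--     while True:
--         j = rest.find(format)
--         if j == -1:
--             out.append(rest)
--             break
--         n += 1
--         out.append(rest[:j])
--         out.append('%{}${}'.format(n, last))
--         rest = rest[j + len(format):]
--     return ''.join(out)
-- ===== Notes on version B (the rewrite author's own statement) =====
-- stated objective: alternative
-- what changed: B replaces A's split-into-a-list-then-enumerate-and-rejoin with a single forward scan that repeatedly find()s the next occurrence in the remaining suffix, emitting each piece and its '%n$c' specifier as it goes.
import Mathlib
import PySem

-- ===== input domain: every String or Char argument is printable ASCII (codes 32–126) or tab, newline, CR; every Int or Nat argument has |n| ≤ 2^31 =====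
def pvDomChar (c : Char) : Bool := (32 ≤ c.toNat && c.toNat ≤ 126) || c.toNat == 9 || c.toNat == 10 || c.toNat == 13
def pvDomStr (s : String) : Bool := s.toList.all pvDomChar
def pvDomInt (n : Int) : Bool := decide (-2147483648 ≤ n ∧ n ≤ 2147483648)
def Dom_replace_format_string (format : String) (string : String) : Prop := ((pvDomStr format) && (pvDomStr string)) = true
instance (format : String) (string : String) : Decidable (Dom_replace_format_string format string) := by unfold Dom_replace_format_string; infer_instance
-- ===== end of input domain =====

-- B replaces A's split+enumerate join with a single forward scan using find(); same output (alternative decomposition, not claimed faster).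

-- ===== PORT A =====
-- A: split on `format`, then rejoin with '%{index}${format[-1]}' between pieces.
-- (in the enumerate loop, `splited_strings[index]` is exactly the enumerated value `iv.2`)
def replace_format_string (format : String) (string : String) : String :=
  if PySem.Str.find string format ≠ -1 then
    let splited_strings := PySem.Chars.splitOn string.toList format.toList
    String.mk ((PySem.List.enumerate splited_strings).foldl
      (fun acc iv =>
        if iv.1 = 0 then acc ++ iv.2
        else if 0 < iv.1 then
          acc ++ ('%' :: (PySem.Int.toStr iv.1).toList ++ '$' ::
                  ((PySem.List.pyGet? format.toList (-1)).elim [] (fun c => [c])) ++ iv.2)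
        else acc) [])
  else string

-- ===== PORT B =====
-- B's while-loop: find next occurrence in the remaining suffix, emit the prefix and a
-- '%n$c' specifier, continue on the rest; fuel = |string|+1 bounds the iterations
-- (each one drops ≥ 1 character when `format` is nonempty, i.e. on Pre_).
def altLoop (sep last : List Char) : Nat → List Char → Int → List (List Char) → List Char
  | 0, _, _, out => PySem.Chars.join [] out
  | fuel+1, rest, n, out =>
    let j := PySem.Chars.find rest sep
    if j = -1 then PySem.Chars.join [] (out ++ [rest])
    else altLoop sep last fuel (PySem.List.slice rest (some (j + sep.length)) none) (n+1)
          (out ++ [PySem.List.slice rest none (some j),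
                   '%' :: (PySem.Int.toStr (n+1)).toList ++ '$' :: last])

def replace_format_string_alt (format : String) (string : String) : String :=
  if PySem.Str.isIn format string then
    let last := (PySem.List.pyGet? format.toList (-1)).elim [] (fun c => [c])
    String.mk (altLoop format.toList last (string.length + 1) string.toList 0 [])
  else string

-- ===== PRECONDITION & SPEC =====
-- Pre_ excludes only the empty `format`, on which A raises ValueError (str.split('')).
def Pre_replace_format_string (format : String) (string : String) : Prop := format ≠ ""
instance (format : String) (string : String) : Decidable (Pre_replace_format_string format string) := by unfold Pre_replace_format_string; infer_instance
def pvWitness_replace_format_string : String × String := ("a", "bab")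

def Spec_replace_format_string (format : String) (string : String) (out : String) : Prop := out = replace_format_string_alt format string
instance (format : String) (string : String) (out : String) : Decidable (Spec_replace_format_string format string out) := by unfold Spec_replace_format_string; infer_instance

-- ===== CLAIM (what is proved, stated in full; the proofs are below) =====
def Claim_equal_replace_format_string : Prop := ∀ (format : String) (string : String), Dom_replace_format_string format string → Pre_replace_format_string format string → Spec_replace_format_string format string (replace_format_string format string)

-- ===== LEMMAS AND PROOFS =====

-- Canonical first-occurrence split (proof helper only).
def fsp (sep : List Char) (s : List Char) : List (List Char) :=
  if h : PySem.Chars.find s sep = -1 ∨ sep = [] then [s]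
  else
    s.take (PySem.Chars.find s sep).toNat ::
      fsp sep (s.drop ((PySem.Chars.find s sep).toNat + sep.length))
termination_by s.length
decreasing_by
  push_neg at h
  have h0 : -1 ≤ PySem.Chars.find s sep := PySem.Chars.neg_one_le_find s sep
  have hpos : 0 ≤ PySem.Chars.find s sep := by omega
  have hinf : sep <:+: s := (PySem.Chars.find_nonneg_iff s sep).1 hpos
  have hsne : s ≠ [] := by
    intro hs; subst hs
    exact h.2 (List.eq_nil_of_infix_nil hinf)
  have hslen : 0 < s.length := List.length_pos_iff.2 hsne
  have hsep : 0 < sep.length := List.length_pos_iff.2 h.2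
  simp only [List.length_drop]
  omega

theorem fsp_ne_nil (sep s : List Char) : fsp sep s ≠ [] := by
  rw [fsp]; split <;> simp

theorem fsp_headI_tail (sep s : List Char) :
    (fsp sep s).headI :: (fsp sep s).tail = fsp sep s := by
  rcases h : fsp sep s with _ | ⟨p, t⟩
  · exact absurd h (fsp_ne_nil sep s)
  · simp

theorem find_first (s sub : List Char) (j : Nat)
    (h1 : sub <+: s.drop j) (h2 : ∀ i < j, ¬ sub <+: s.drop i) :
    PySem.Chars.find s sub = (j : Int) := by
  have hinf : sub <:+: s := h1.isInfix.trans (List.drop_suffix j s).isInfix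
  have h0 : 0 ≤ PySem.Chars.find s sub := (PySem.Chars.find_nonneg_iff s sub).2 hinf
  obtain ⟨ha, hb⟩ := PySem.Chars.find_spec h0
  rcases lt_trichotomy (PySem.Chars.find s sub).toNat j with h | h | h
  · exact absurd ha (h2 _ h)
  · omega
  · exact absurd h1 (hb j h)

theorem find_cons (sep : List Char) (c : Char) (rest : List Char)
    (hsep : sep ≠ []) (hnp : ¬ sep <+: (c :: rest)) :
    PySem.Chars.find (c :: rest) sep =
      if PySem.Chars.find rest sep = -1 then -1 else PySem.Chars.find rest sep + 1 := by
  split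
  · next hneg =>
    rw [PySem.Chars.find_eq_neg_one_iff]
    rw [PySem.Chars.find_eq_neg_one_iff] at hneg
    intro hinf
    rcases List.infix_cons_iff.1 hinf with h | h
    · exact hnp h
    · exact hneg h
  · next hne =>
    have h0 : 0 ≤ PySem.Chars.find rest sep := by
      have := PySem.Chars.neg_one_le_find rest sep; omega
    obtain ⟨ha, hb⟩ := PySem.Chars.find_spec h0
    have := find_first (c :: rest) sep ((PySem.Chars.find rest sep).toNat + 1)
      (by simpa using ha)
      (by
        intro i hi
        cases i with
        | zero => simpa using hnp
        | succ k => exact fun hk => hb k (by omega) (by simpa using hk))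
    rw [this]; omega

theorem fsp_cons (sep : List Char) (c : Char) (rest : List Char)
    (hsep : sep ≠ []) (hnp : ¬ sep <+: (c :: rest)) :
    fsp sep (c :: rest) = ((c :: (fsp sep rest).headI) :: (fsp sep rest).tail) := by
  have hfc := find_cons sep c rest hsep hnp
  by_cases hneg : PySem.Chars.find rest sep = -1
  · have h1 : fsp sep (c :: rest) = [c :: rest] := by
      rw [fsp]; exact dif_pos (Or.inl (by rw [hfc, if_pos hneg]))
    have h2 : fsp sep rest = [rest] := by
      rw [fsp]; exact dif_pos (Or.inl hneg)
    rw [h1, h2]; simp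
  · have h0 : 0 ≤ PySem.Chars.find rest sep := by
      have := PySem.Chars.neg_one_le_find rest sep; omega
    have h2 : fsp sep rest
        = rest.take (PySem.Chars.find rest sep).toNat ::
            fsp sep (rest.drop ((PySem.Chars.find rest sep).toNat + sep.length)) := by
      rw [fsp, dif_neg (by push_neg; exact ⟨hneg, hsep⟩)]
    have ht : (PySem.Chars.find rest sep + 1).toNat
        = (PySem.Chars.find rest sep).toNat + 1 := by omega
    have h1 : fsp sep (c :: rest)
        = (c :: rest).take ((PySem.Chars.find rest sep).toNat + 1) ::
            fsp sep ((c :: rest).drop ((PySem.Chars.find rest sep).toNat + 1 + sep.length)) := by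
      rw [fsp]
      simp only [hfc, if_neg hneg, ht]
      rw [dif_neg (by push_neg; exact ⟨by omega, hsep⟩)]
    have hd : (PySem.Chars.find rest sep).toNat + 1 + sep.length
        = ((PySem.Chars.find rest sep).toNat + sep.length) + 1 := by omega
    rw [h1, h2, hd]
    simp [List.take_succ_cons]

theorem fsp_of_prefix (sep : List Char) (s : List Char)
    (hsep : sep ≠ []) (hp : sep <+: s) :
    fsp sep s = [] :: fsp sep (s.drop sep.length) := by
  have hf : PySem.Chars.find s sep = (0 : Int) :=
    find_first s sep 0 (by simpa using hp) (by omega)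
  rw [fsp, dif_neg (by push_neg; exact ⟨by rw [hf]; omega, hsep⟩)]
  simp [hf]

theorem go_eq (sep : List Char) (hsep : sep ≠ []) :
    ∀ fuel l cur acc, l.length ≤ fuel →
      PySem.Chars.splitOn.go sep fuel l cur acc =
        acc.reverse ++ ((cur.reverse ++ (fsp sep l).headI) :: (fsp sep l).tail) := by
  intro fuel
  induction fuel with
  | zero =>
    intro l cur acc hl
    have : l = [] := List.eq_nil_of_length_eq_zero (by omega)
    subst this
    rw [fsp, dif_pos (Or.inl (by
      rw [PySem.Chars.find_eq_neg_one_iff]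
      intro hinf
      exact hsep (List.eq_nil_of_infix_nil hinf)))]
    simp [PySem.Chars.splitOn.go]
  | succ fuel ih =>
    intro l cur acc hl
    cases l with
    | nil =>
      rw [fsp, dif_pos (Or.inl (by
        rw [PySem.Chars.find_eq_neg_one_iff]
        intro hinf
        exact hsep (List.eq_nil_of_infix_nil hinf)))]
      simp [PySem.Chars.splitOn.go]
    | cons c rest =>
      rw [PySem.Chars.splitOn.go]
      by_cases hp : sep.isPrefixOf (c :: rest)
      · rw [if_pos hp]
        have hp' : sep <+: (c :: rest) := List.isPrefixOf_iff_prefix.1 hp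
        have hsl : 0 < sep.length := List.length_pos_iff.2 hsep
        have hdl : (List.drop sep.length (c :: rest)).length ≤ fuel := by
          simp only [List.length_drop, List.length_cons]
          simp only [List.length_cons] at hl
          omega
        rw [ih _ _ _ hdl, fsp_of_prefix sep _ hsep hp']
        simp [fsp_headI_tail]
      · rw [if_neg hp]
        have hnp : ¬ sep <+: (c :: rest) := fun h => hp (List.isPrefixOf_iff_prefix.2 h)
        have hrl : rest.length ≤ fuel := by
          simp only [List.length_cons] at hl; omega
        rw [ih _ _ _ hrl, fsp_cons sep c rest hsep hnp]
        simp

theorem splitOn_eq_fsp (sep s : List Char) (hsep : sep ≠ []) :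
    PySem.Chars.splitOn s sep = fsp sep s := by
  rw [PySem.Chars.splitOn, go_eq sep hsep (s.length + 1) s [] [] (by omega)]
  rcases hne : fsp sep s with _ | ⟨p, t⟩
  · exact absurd hne (fsp_ne_nil sep s)
  · simp

-- the '%k$c' segments appended after the first piece, counter k
def seglist (last : List Char) : Int → List (List Char) → List Char
  | _, [] => []
  | k, v :: t => ('%' :: (PySem.Int.toStr k).toList ++ '$' :: last ++ v) ++ seglist last (k+1) t

theorem join_nil_eq_flatten (xs : List (List Char)) :
    PySem.Chars.join [] xs = xs.flatten := by
  induction xs with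
  | nil => simp [PySem.Chars.join_nil]
  | cons p t ih =>
    cases t with
    | nil => simp [PySem.Chars.join_singleton]
    | cons q r => rw [PySem.Chars.join_cons_cons, ih]; simp

theorem afold_pos (last : List Char) :
    ∀ (ps : List (List Char)) (k : Int), 0 < k → ∀ acc,
      (PySem.List.enumerate ps k).foldl
        (fun acc iv =>
          if iv.1 = 0 then acc ++ iv.2
          else if 0 < iv.1 then
            acc ++ (('%' :: (PySem.Int.toStr iv.1).toList ++ '$' :: last) ++ iv.2)
          else acc) acc = acc ++ seglist last k ps := by
  intro ps
  induction ps with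
  | nil => intro k hk acc; simp [PySem.List.enumerate, seglist]
  | cons v t ih =>
    intro k hk acc
    rw [PySem.List.enumerate, List.foldl_cons]
    simp only
    rw [if_neg (by omega), if_pos hk, ih (k+1) (by omega)]
    simp [seglist]

theorem altLoop_eq (sep last : List Char) (hsep : sep ≠ []) :
    ∀ fuel (s : List Char) (n : Int) out, s.length < fuel →
      altLoop sep last fuel s n out =
        PySem.Chars.join [] out ++ ((fsp sep s).headI ++ seglist last (n+1) (fsp sep s).tail) := by
  intro fuel
  induction fuel with
  | zero => intro s n out h; omega
  | succ fuel ih =>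
    intro s n out h
    rw [altLoop]
    by_cases hneg : PySem.Chars.find s sep = -1
    · rw [if_pos hneg, fsp, dif_pos (Or.inl hneg)]
      simp [seglist, join_nil_eq_flatten]
    · rw [if_neg hneg]
      have h0 : 0 ≤ PySem.Chars.find s sep := by
        have := PySem.Chars.neg_one_le_find s sep; omega
      have hinf : sep <:+: s := (PySem.Chars.find_nonneg_iff s sep).1 h0
      have hsne : s ≠ [] := fun hs => hsep (List.eq_nil_of_infix_nil (hs ▸ hinf))
      have hsl : 0 < s.length := List.length_pos_iff.2 hsne
      have hsepl : 0 < sep.length := List.length_pos_iff.2 hsep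
      have hto : (PySem.Chars.find s sep + sep.length).toNat
          = (PySem.Chars.find s sep).toNat + sep.length := by omega
      rw [PySem.List.slice_from _ (by omega), PySem.List.slice_to _ h0, hto]
      have hdl : (List.drop ((PySem.Chars.find s sep).toNat + sep.length) s).length < fuel := by
        simp only [List.length_drop]; omega
      have hufs : fsp sep s
          = List.take (PySem.Chars.find s sep).toNat s ::
              fsp sep (List.drop ((PySem.Chars.find s sep).toNat + sep.length) s) := by
        rw [fsp, dif_neg (by push_neg; exact ⟨hneg, hsep⟩)]
      rcases hne : fsp sep (List.drop ((PySem.Chars.find s sep).toNat + sep.length) s)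
        with _ | ⟨p, t⟩
      · exact absurd hne (fsp_ne_nil _ _)
      · rw [ih _ _ _ hdl, hufs, hne]
        simp [seglist, join_nil_eq_flatten]

-- ===== VERDICT (by name: the statement is the Claim_ definition above) =====
theorem replace_format_string_spec : Claim_equal_replace_format_string := by
  intro format string _ hpre
  unfold Spec_replace_format_string
  unfold replace_format_string replace_format_string_alt
  dsimp only
  have hsep : format.toList ≠ [] := by
    intro h
    exact hpre (by simpa using congrArg String.ofList h)
  by_cases hin : format.toList <:+: string.toList
  · rw [if_pos ((PySem.Str.find_ne_neg_one_iff string format).2 hin),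
        if_pos ((PySem.Str.isIn_iff_infix format string).2 hin)]
    rw [splitOn_eq_fsp _ _ hsep]
    rw [altLoop_eq format.toList _ hsep (string.length + 1) string.toList 0 []
        (by simpa using Nat.lt_succ_self string.length)]
    rcases hne : fsp format.toList string.toList with _ | ⟨p, t⟩
    · exact absurd hne (fsp_ne_nil _ _)
    · rw [PySem.List.enumerate, List.foldl_cons]
      dsimp only
      rw [if_pos rfl, afold_pos _ t (0 + 1) (by omega) ([] ++ p)]
      simp
  · rw [if_neg (by
        intro hne
        exact hin ((PySem.Str.find_ne_neg_one_iff string format).1 hne)),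
      if_neg (by
        intro htr
        exact hin ((PySem.Str.isIn_iff_infix format string).1 htr))]
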